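-- pv_equiv track=rewrite | github.com/dee42/virtualtime | virtualtime/__init__.py | _repair_year
-- ===== SOURCE A (Python) =====
-- def _repair_year(s1, s2, y1, y2, year):
--     """takes two strings differing only by year, and replaces their years (which must be 4-digit) with a new one"""
--     ys1 = "%04d" % y1
--     ys2 = "%04d" % y2
--     ys = "%d" % year
--     t = ""
--     i = 0
--     while True:
--         f = s1.find(ys1, i)
--         if f == -1:
--             break
--         if s2[f:f+4] != ys2:
--             t += s1[i:f+1]
--             i = f + 1
--             continue
--         t += s1[i:f] + ys
--         i = f + 4
--     t += s1[i:]
--     return t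
-- ===== SOURCE B (Python) =====
-- def _repair_year(s1, s2, y1, y2, year):
--     """takes two strings differing only by year, and replaces their years (which must be 4-digit) with a new one"""
--     ys1 = "%04d" % y1
--     ys2 = "%04d" % y2
--     ys = "%d" % year
--     out = []
--     i = 0
--     n = len(s1)
--     while i < n:
--         if s1[i:i+len(ys1)] == ys1 and s2[i:i+4] == ys2:
--             out.append(ys)
--             i += 4
--         else:
--             out.append(s1[i])
--             i += 1
--     return "".join(out)
-- ===== Notes on version B (the rewrite author's own statement) =====
-- stated objective: simpler
-- what changed: Replaced A's str.find-based jumping while-loop with accumulator-string slicing by a single direct index scan that tests each position for the ys1/ys2 match and otherwise copies one character, joining a list at the end.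
import Mathlib
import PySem

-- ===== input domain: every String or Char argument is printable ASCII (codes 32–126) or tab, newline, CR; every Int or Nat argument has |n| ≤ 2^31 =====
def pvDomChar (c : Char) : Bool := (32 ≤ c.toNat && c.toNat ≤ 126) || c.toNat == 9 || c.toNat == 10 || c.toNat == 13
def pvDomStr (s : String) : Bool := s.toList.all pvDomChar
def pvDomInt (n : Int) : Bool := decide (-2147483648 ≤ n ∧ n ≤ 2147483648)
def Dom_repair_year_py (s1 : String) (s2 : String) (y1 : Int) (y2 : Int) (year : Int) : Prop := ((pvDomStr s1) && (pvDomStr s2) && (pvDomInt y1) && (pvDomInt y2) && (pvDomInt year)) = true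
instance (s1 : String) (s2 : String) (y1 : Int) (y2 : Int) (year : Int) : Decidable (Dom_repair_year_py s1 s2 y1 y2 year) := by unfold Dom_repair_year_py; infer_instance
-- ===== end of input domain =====

-- B replaces A's str.find-jumping while-loop by a single direct index scan that tests each
-- position and merges the match/mismatch copy logic (objective: simpler; same O(n·m) cost).


-- ===== PORT A =====
-- "%04d" % y = str(y).zfill(4) (zero-pad to total width 4, sign kept in front) — exact for every Int
def pvFmt04 (y : Int) : List Char := PySem.Chars.zfill (PySem.Int.toChars y) 4

-- termination fact for the while-loop: s1.find(ys1, i) only succeeds when i ≤ len(s1)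
theorem pvFindFrom_le_of_ne (s sub : List Char) (k : Nat)
    (h : PySem.Chars.findFrom s sub (k : Int) none ≠ -1) : k ≤ s.length := by
  by_contra hk
  apply h
  simp [PySem.Chars.findFrom]
  omega

-- A's 'while True' loop, state (t, i); each iteration strictly increases i (f ≥ i, new i is f+1 or f+4)
def pvLoopA (s1 s2 ys1 ys2 ys : List Char) (t : List Char) (i : Nat) : List Char :=
  if hf : PySem.Chars.findFrom s1 ys1 (i : Int) none = -1 then
    t ++ PySem.List.slice s1 (some (i : Int)) none          -- break; then t += s1[i:]
  else
    -- Python's local 'f = s1.find(ys1, i)' (an index ≥ i here), written inline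
    if PySem.List.slice s2 (some ((PySem.Chars.findFrom s1 ys1 (i : Int) none).toNat : Int)) (some (((PySem.Chars.findFrom s1 ys1 (i : Int) none).toNat : Int) + 4)) ≠ ys2 then
      pvLoopA s1 s2 ys1 ys2 ys (t ++ PySem.List.slice s1 (some (i : Int)) (some (((PySem.Chars.findFrom s1 ys1 (i : Int) none).toNat : Int) + 1))) ((PySem.Chars.findFrom s1 ys1 (i : Int) none).toNat + 1)
    else
      pvLoopA s1 s2 ys1 ys2 ys (t ++ PySem.List.slice s1 (some (i : Int)) (some ((PySem.Chars.findFrom s1 ys1 (i : Int) none).toNat : Int)) ++ ys) ((PySem.Chars.findFrom s1 ys1 (i : Int) none).toNat + 4)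
termination_by s1.length + 1 - i
decreasing_by
  · have hk := pvFindFrom_le_of_ne s1 ys1 i hf
    have h1 := (PySem.Chars.findFrom_natCast_spec s1 ys1 i hk hf).1
    omega
  · have hk := pvFindFrom_le_of_ne s1 ys1 i hf
    have h1 := (PySem.Chars.findFrom_natCast_spec s1 ys1 i hk hf).1
    omega

def repair_year_py (s1 : String) (s2 : String) (y1 : Int) (y2 : Int) (year : Int) : String :=
  String.ofList (pvLoopA s1.toList s2.toList (pvFmt04 y1) (pvFmt04 y2) (PySem.Int.toChars year) [] 0)

-- ===== PORT B =====
-- B's 'while i < n' scan, state (out, i); s1[i] is exact here because i < len s1 holds in that branch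
def pvScanB (s1 s2 ys1 ys2 ys : List Char) (out : List Char) (i : Nat) : List Char :=
  if h : i < s1.length then
    if PySem.List.slice s1 (some (i : Int)) (some ((i : Int) + (ys1.length : Int))) = ys1 ∧
       PySem.List.slice s2 (some (i : Int)) (some ((i : Int) + 4)) = ys2 then
      pvScanB s1 s2 ys1 ys2 ys (out ++ ys) (i + 4)
    else
      pvScanB s1 s2 ys1 ys2 ys (out ++ [s1[i]]) (i + 1)
  else out
termination_by s1.length - i

def repair_year_py_alt (s1 : String) (s2 : String) (y1 : Int) (y2 : Int) (year : Int) : String :=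
  String.ofList (pvScanB s1.toList s2.toList (pvFmt04 y1) (pvFmt04 y2) (PySem.Int.toChars year) [] 0)

-- ===== PRECONDITION & SPEC =====
def Spec_repair_year_py (s1 : String) (s2 : String) (y1 : Int) (y2 : Int) (year : Int) (out : String) : Prop := out = repair_year_py_alt s1 s2 y1 y2 year
instance (s1 : String) (s2 : String) (y1 : Int) (y2 : Int) (year : Int) (out : String) : Decidable (Spec_repair_year_py s1 s2 y1 y2 year out) := by unfold Spec_repair_year_py; infer_instance

-- ===== CLAIM (what is proved, stated in full; the proofs are below) =====
def Claim_equal_repair_year_py : Prop := ∀ (s1 : String) (s2 : String) (y1 : Int) (y2 : Int) (year : Int), Dom_repair_year_py s1 s2 y1 y2 year → Spec_repair_year_py s1 s2 y1 y2 year (repair_year_py s1 s2 y1 y2 year)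

-- ===== LEMMAS AND PROOFS =====

-- no occurrence of ys1 at position j ≥ i once ys1 is absent from s1.drop i
theorem pvNoPrefix_of_notInfix (s sub : List Char) (i j : Nat) (hij : i ≤ j)
    (h : ¬ sub <:+: s.drop i) (hp : sub <+: s.drop j) : False := by
  apply h
  have hd : s.drop j = (s.drop i).drop (j - i) := by rw [List.drop_drop]; congr 1; omega
  rw [hd] at hp
  exact hp.isInfix.trans (List.drop_suffix _ _).isInfix

-- the natural-number shape of the slices both ports use
theorem pvSlice_nat (xs : List Char) (a n : Nat) :
    PySem.List.slice xs (some (a : Int)) (some ((a : Int) + (n : Int))) = (xs.drop a).take n :=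
  PySem.List.slice_natCast_add xs a n

-- B scans a match-free region one character at a time, copying it verbatim
theorem pvScanB_no_match (s1 s2 ys1 ys2 ys : List Char) :
    ∀ (d i : Nat) (out : List Char), i + d ≤ s1.length →
    (∀ j, i ≤ j → j < i + d → ¬ ys1 <+: s1.drop j) →
    pvScanB s1 s2 ys1 ys2 ys out i = pvScanB s1 s2 ys1 ys2 ys (out ++ (s1.drop i).take d) (i + d) := by
  intro d
  induction d with
  | zero => intro i out _ _; simp
  | succ d ih =>
    intro i out hlen hnm
    have hi : i < s1.length := by omega
    have hnp : ¬ ys1 <+: s1.drop i := hnm i (by omega) (by omega)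
    rw [pvScanB, dif_pos hi, if_neg]
    · rw [ih (i + 1) (out ++ [s1[i]]) (by omega) (fun j hj1 hj2 => hnm j (by omega) (by omega))]
      have hdrop : s1.drop i = s1[i] :: s1.drop (i + 1) := List.drop_eq_getElem_cons hi
      rw [show i + 1 + d = i + (d + 1) by omega]
      congr 1
      rw [hdrop, List.take_succ_cons, List.append_assoc]
      rfl
    · rintro ⟨h1, _⟩
      apply hnp
      rw [pvSlice_nat] at h1
      rw [List.prefix_iff_eq_take]
      exact h1.symm

-- main loop invariant: from any position i ≤ len s1 and any accumulator, A's loop and B's scan agree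
theorem pvLoopA_eq_pvScanB (s1 s2 ys1 ys2 ys : List Char) (h4 : 4 ≤ ys1.length) :
    ∀ (N i : Nat) (t : List Char), s1.length - i ≤ N → i ≤ s1.length →
    pvLoopA s1 s2 ys1 ys2 ys t i = pvScanB s1 s2 ys1 ys2 ys t i := by
  intro N
  induction N with
  | zero =>
    intro i t hN hle
    have hi : i = s1.length := by omega
    rw [pvLoopA, dif_pos, pvScanB, dif_neg (by omega)]
    · subst hi
      simp [PySem.List.slice_from_natCast]
    · rw [PySem.Chars.findFrom_natCast_eq_neg_one_iff s1 ys1 i hle]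
      subst hi
      simp
      intro hinf
      rw [hinf] at h4
      simp at h4
  | succ N ih =>
    intro i t hN hle
    rw [pvLoopA]
    by_cases hf : PySem.Chars.findFrom s1 ys1 (i : Int) none = -1
    · rw [dif_pos hf]
      have hni : ¬ ys1 <:+: s1.drop i :=
        (PySem.Chars.findFrom_natCast_eq_neg_one_iff s1 ys1 i hle).mp hf
      rw [pvScanB_no_match s1 s2 ys1 ys2 ys (s1.length - i) i t (by omega)
            (fun j hj _ hp => pvNoPrefix_of_notInfix s1 ys1 i j hj hni hp)]
      rw [show i + (s1.length - i) = s1.length by omega]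
      rw [pvScanB, dif_neg (by omega)]
      rw [PySem.List.slice_from_natCast]
      congr 1
      exact (List.take_of_length_le (by simp)).symm
    · rw [dif_neg hf]
      obtain ⟨h1, h2, h3⟩ := PySem.Chars.findFrom_natCast_spec s1 ys1 i hle hf
      set fI := PySem.Chars.findFrom s1 ys1 (i : Int) none with hfI
      have hif : i ≤ fI.toNat := by omega
      have hfit : fI.toNat + ys1.length ≤ s1.length := by
        have := h2.length_le
        simp at this
        omega
      have hflt : fI.toNat < s1.length := by omega
      -- B scans the match-free stretch [i, f) verbatim, then stands at f
      rw [pvScanB_no_match s1 s2 ys1 ys2 ys (fI.toNat - i) i t (by omega)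
            (fun j hj hjlt => h3 j hj (by omega))]
      rw [show i + (fI.toNat - i) = fI.toNat by omega]
      -- at f the ys1-test of B succeeds
      have hys1 : PySem.List.slice s1 (some (fI.toNat : Int)) (some ((fI.toNat : Int) + (ys1.length : Int))) = ys1 := by
        rw [pvSlice_nat]
        exact (List.prefix_iff_eq_take.mp h2).symm
      rw [pvScanB, dif_pos hflt]
      by_cases hc : PySem.List.slice s2 (some ((fI.toNat : Int))) (some ((fI.toNat : Int) + 4)) = ys2
      · -- replacement branch: both emit ys and resume at f+4
        rw [if_neg (not_not_intro hc), if_pos ⟨hys1, hc⟩]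
        rw [ih (fI.toNat + 4) _ (by omega) (by omega)]
        congr 2
        rw [PySem.List.slice_natCast]
      · -- mismatch branch: both copy up to and including s1[f] and resume at f+1
        rw [if_pos hc, if_neg (by rintro ⟨_, hb⟩; exact hc hb)]
        rw [ih (fI.toNat + 1) _ (by omega) (by omega)]
        congr 1
        rw [show ((fI.toNat : Int) + 1) = (((fI.toNat + 1 : Nat)) : Int) by push_cast; ring]
        rw [PySem.List.slice_natCast]
        rw [show fI.toNat + 1 - i = (fI.toNat - i) + 1 by omega]
        rw [List.take_add_one, List.append_assoc]
        congr 1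
        rw [List.getElem?_drop]
        rw [show i + (fI.toNat - i) = fI.toNat by omega]
        simp [List.getElem?_eq_getElem hflt]

-- ===== VERDICT (by name: the statement is the Claim_ definition above) =====
theorem repair_year_py_spec : Claim_equal_repair_year_py := by
  intro s1 s2 y1 y2 year _
  unfold Spec_repair_year_py repair_year_py repair_year_py_alt
  have h4 : 4 ≤ (pvFmt04 y1).length := by
    unfold pvFmt04
    rw [PySem.Chars.length_zfill]
    omega
  rw [pvLoopA_eq_pvScanB _ _ _ _ _ h4 s1.toList.length 0 [] (by omega) (by omega)]
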